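-- pv_equiv track=rewrite | github.com/APXAXN/performance-meal-planner | src/run_weekly.py | _parse_qa_summary
-- ===== SOURCE A (Python) =====
-- def _parse_qa_summary(qa_report):
--     overall = "PASS"
--     top_issues = []
--     lines = qa_report.splitlines()
--     for i, line in enumerate(lines):
--         if line.startswith("## Overall:"):
--             overall = line.split(":", 1)[1].strip()
--         if line.strip() == "## Blocking Issues":
--             j = i + 1
--             while j < len(lines) and (lines[j].startswith("- ") or lines[j].startswith("  - ")):
--                 text = lines[j].lstrip("- ").strip()
--                 if text and text != "None":
--                     top_issues.append(text)
--                 j += 1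
--     return overall, top_issues[:3], ""
-- ===== SOURCE B (Python) =====
-- def _parse_qa_summary(qa_report):
--     overall = "PASS"
--     top_issues = []
--     in_blocking = False
--     for line in qa_report.splitlines():
--         if line.startswith("## Overall:"):
--             overall = line.split(":", 1)[1].strip()
--         if in_blocking and (line.startswith("- ") or line.startswith("  - ")):
--             text = line.lstrip("- ").strip()
--             if text and text != "None":
--                 top_issues.append(text)
--         else:
--             in_blocking = line.strip() == "## Blocking Issues"
--     return overall, top_issues[:3], ""
-- ===== Notes on version B (the rewrite author's own statement) =====
-- stated objective: simpler
-- what changed: Replaced the header-detect loop with a nested lookahead while (which rescans bullet lines the outer loop also visits) by a single linear pass over splitlines() carrying an in_blocking flag.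
import Mathlib
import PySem

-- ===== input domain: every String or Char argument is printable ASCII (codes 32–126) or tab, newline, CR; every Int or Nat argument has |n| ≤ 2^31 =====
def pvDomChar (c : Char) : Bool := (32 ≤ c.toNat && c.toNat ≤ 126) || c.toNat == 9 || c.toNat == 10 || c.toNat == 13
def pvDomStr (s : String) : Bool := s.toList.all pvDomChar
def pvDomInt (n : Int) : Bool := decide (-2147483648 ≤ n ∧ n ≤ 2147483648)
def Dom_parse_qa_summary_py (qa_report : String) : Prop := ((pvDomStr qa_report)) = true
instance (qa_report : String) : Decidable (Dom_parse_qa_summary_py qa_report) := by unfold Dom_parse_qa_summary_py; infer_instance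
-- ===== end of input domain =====

-- B replaces A's header-detect-plus-lookahead-while with one linear pass carrying an in-block flag (objective: simpler).

-- Shared ports of the Python string expressions both versions use verbatim:
-- line.startswith("- ") or line.startswith("  - ")
def pvIsBullet (l : String) : Bool :=
  PySem.Str.startswith l "- " || PySem.Str.startswith l "  - "

-- line.lstrip("- "): drop leading chars from the set {'-', ' '}  (exact port of str.lstrip(chars))
-- then .strip()
def pvText (l : String) : String :=
  PySem.Str.strip (String.ofList (l.toList.dropWhile (fun c => c == '-' || c == ' ')))

-- line.split(":", 1)[1].strip(); only evaluated when the line starts with "## Overall:",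
-- so the split always has two parts and the defaults below are never used (Python would raise IndexError otherwise)
def pvOverall (l : String) : String :=
  PySem.Str.strip (((PySem.Str.splitMax? l ":" 1).getD []).getD 1 "")

-- ===== PORT A =====
-- the inner 'while j < len(lines) and (bullet)' lookahead, transcribed as recursion over the suffix after the header line
def pvWhileA : List String → List String → List String
  | [], acc => acc
  | l :: rest, acc =>
    if pvIsBullet l then
      let text := pvText l
      pvWhileA rest (if text ≠ "" ∧ text ≠ "None" then acc ++ [text] else acc)
    else acc

-- the outer 'for i, line in enumerate(lines)' loop (the index i only addresses the suffix lines[i+1:], carried here directly)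
def pvForA : List String → String → List String → String × List String
  | [], overall, acc => (overall, acc)
  | l :: rest, overall, acc =>
    let overall' := if PySem.Str.startswith l "## Overall:" then pvOverall l else overall
    let acc' := if PySem.Str.strip l = "## Blocking Issues" then pvWhileA rest acc else acc
    pvForA rest overall' acc'

def parse_qa_summary_py (qa_report : String) : String × List String × String :=
  let lines := PySem.Str.splitlines qa_report
  let r := pvForA lines "PASS" []
  (r.1, PySem.List.slice r.2 none (some 3), "")

-- ===== PORT B =====
-- B's single pass: one fold over the lines carrying (in_blocking, overall, top_issues)
def pvForB : List String → Bool → String → List String → String × List String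
  | [], _, overall, acc => (overall, acc)
  | l :: rest, inb, overall, acc =>
    let overall' := if PySem.Str.startswith l "## Overall:" then pvOverall l else overall
    if inb && pvIsBullet l then
      let text := pvText l
      pvForB rest inb overall' (if text ≠ "" ∧ text ≠ "None" then acc ++ [text] else acc)
    else
      pvForB rest (PySem.Str.strip l == "## Blocking Issues") overall' acc

def parse_qa_summary_py_alt (qa_report : String) : String × List String × String :=
  let lines := PySem.Str.splitlines qa_report
  let r := pvForB lines false "PASS" []
  (r.1, PySem.List.slice r.2 none (some 3), "")

-- ===== PRECONDITION & SPEC =====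
def Spec_parse_qa_summary_py (qa_report : String) (out : String × List String × String) : Prop := out = parse_qa_summary_py_alt qa_report
instance (qa_report : String) (out : String × List String × String) : Decidable (Spec_parse_qa_summary_py qa_report out) := by unfold Spec_parse_qa_summary_py; infer_instance

-- ===== CLAIM (what is proved, stated in full; the proofs are below) =====
def Claim_equal_parse_qa_summary_py : Prop := ∀ (qa_report : String), Dom_parse_qa_summary_py qa_report → Spec_parse_qa_summary_py qa_report (parse_qa_summary_py qa_report)

-- ===== LEMMAS AND PROOFS =====

-- a non-space head survives rstrip
theorem pv_rstrip_head (c : Char) (t : List Char) (hc : PySem.Chars.isspace c = false) :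
    ∃ t', PySem.Chars.rstrip (c :: t) = c :: t' := by
  simp only [PySem.Chars.rstrip, List.reverse_cons, List.dropWhile_append]
  split
  · exact ⟨[], by simp [List.dropWhile, hc]⟩
  · exact ⟨(List.dropWhile PySem.Chars.isspace t.reverse).reverse, by simp⟩

-- a bullet line ("- " / "  - " prefixed) strips to something starting with '-', so never to "## Blocking Issues"
theorem pv_bullet_not_header (l : String) (h : pvIsBullet l = true) :
    PySem.Str.strip l ≠ "## Blocking Issues" := by
  intro he
  have htl : PySem.Chars.strip l.toList = "## Blocking Issues".toList := by
    rw [← PySem.Str.toList_strip, he]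
  have hpre : ∃ u, PySem.Chars.strip l.toList = '-' :: u := by
    have h' := h
    simp only [pvIsBullet, Bool.or_eq_true, PySem.Str.startswith_eq,
      PySem.Chars.startswith_iff] at h'
    rcases h' with h' | h' <;> rcases h' with ⟨u, hu⟩
    · -- l.toList = '-' :: ' ' :: u
      have : l.toList = '-' :: ' ' :: u := by simpa using hu.symm
      rw [this]
      simp only [PySem.Chars.strip, PySem.Chars.lstrip, List.dropWhile]
      exact pv_rstrip_head '-' (' ' :: u) (by decide)
    · -- l.toList = ' ' :: ' ' :: '-' :: ' ' :: u
      have : l.toList = ' ' :: ' ' :: '-' :: ' ' :: u := by simpa using hu.symm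
      rw [this]
      simp only [PySem.Chars.strip, PySem.Chars.lstrip, List.dropWhile]
      exact pv_rstrip_head '-' (' ' :: u) (by decide)
  rcases hpre with ⟨u, hu⟩
  rw [hu] at htl
  simp at htl

-- the flagged single pass agrees with the lookahead version: flag off ↔ plain continuation,
-- flag on ↔ A has just run its lookahead while over the same suffix
theorem pv_forB_forA (lines : List String) :
    (∀ overall acc, pvForB lines false overall acc = pvForA lines overall acc) ∧
    (∀ overall acc, pvForB lines true overall acc = pvForA lines overall (pvWhileA lines acc)) := by
  induction lines with
  | nil => exact ⟨fun _ _ => rfl, fun _ _ => rfl⟩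
  | cons l rest ih =>
    constructor
    · intro overall acc
      simp only [pvForB, pvForA, Bool.false_and]
      by_cases hh : PySem.Str.strip l = "## Blocking Issues"
      · simp only [hh, beq_self_eq_true]
        exact ih.2 _ _
      · simp only [if_neg hh, beq_eq_false_iff_ne.mpr hh]
        exact ih.1 _ _
    · intro overall acc
      by_cases hb : pvIsBullet l = true
      · have hnh := pv_bullet_not_header l hb
        simp only [pvForB, pvForA, pvWhileA, hb, Bool.true_and, if_neg hnh]
        exact ih.2 _ _
      · simp only [pvForB, pvForA, pvWhileA, hb, Bool.true_and, Bool.false_eq_true, if_false]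
        by_cases hh : PySem.Str.strip l = "## Blocking Issues"
        · simp only [hh, beq_self_eq_true]
          exact ih.2 _ _
        · simp only [if_neg hh, beq_eq_false_iff_ne.mpr hh]
          exact ih.1 _ _

-- ===== VERDICT (by name: the statement is the Claim_ definition above) =====
theorem parse_qa_summary_py_spec : Claim_equal_parse_qa_summary_py := by
  intro qa_report _
  unfold Spec_parse_qa_summary_py parse_qa_summary_py parse_qa_summary_py_alt
  simp only []
  rw [(pv_forB_forA (PySem.Str.splitlines qa_report)).1]
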